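-- pv_equiv track=rewrite | github.com/KevWald/BRGaitLab | GaitViewerAppv1.py | find_gait_transitions
-- ===== SOURCE A (Python) =====
-- def compress_repeats_with_index(lst):
--     if not lst:
--         return [], []
--     compressed, indices = [lst[0]], [0]
--     for i in range(1, len(lst)):
--         if lst[i] != compressed[-1]:
--             compressed.append(lst[i])
--             indices.append(i)
--     return compressed, indices
--
-- def find_sequence_with_original_indices(column, sequence):
--     matches = []
--     compressed, indices = compress_repeats_with_index(column)
--     for i in range(len(compressed) - len(sequence) + 1):
--         if compressed[i:i + len(sequence)] == sequence:
--             start = indices[i]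
--             j = indices[i + len(sequence) - 1]
--             while j + 1 < len(column) and column[j + 1] == sequence[-1]:
--                 j += 1
--             matches.append((start, j))
--     return matches
--
-- def find_gait_transitions(column):
--     GC_013 = find_sequence_with_original_indices(column, [0, 1, 3])
--     GC_0123 = find_sequence_with_original_indices(column, [0, 1, 2, 3])
--     matches = sorted(GC_013 + GC_0123, key=lambda x: x[0])
--
--     segments = []
--     prev_end = -1
--     for start, end in matches:
--         if prev_end + 1 < start:
--             segments.append((prev_end + 1, start - 1, 'NonGait'))
--         segments.append((start, end, 'Gait'))
--         prev_end = end
--     if prev_end + 1 < len(column):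
--         segments.append((prev_end + 1, len(column) - 1, 'NonGait'))
--     return segments
-- ===== SOURCE B (Python) =====
-- def find_gait_transitions(column):
--     n = len(column)
--     # one forward pass: maximal runs of equal values as (value, start, end)
--     runs = []
--     i = 0
--     while i < n:
--         j = i
--         while j + 1 < n and column[j + 1] == column[i]:
--             j += 1
--         runs.append((column[i], i, j))
--         i = j + 1
--     # scan the runs once, recognizing 0,1,3 and 0,1,2,3 run-value patterns,
--     # emitting Gait spans and the NonGait gaps in the same pass
--     segments = []
--     prev_end = -1
--     m = len(runs)
--     k = 0
--     while k < m:
--         end = None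
--         if k + 2 < m and runs[k][0] == 0 and runs[k + 1][0] == 1:
--             if runs[k + 2][0] == 3:
--                 end = runs[k + 2][2]
--             elif runs[k + 2][0] == 2 and k + 3 < m and runs[k + 3][0] == 3:
--                 end = runs[k + 3][2]
--         if end is not None:
--             start = runs[k][1]
--             if prev_end + 1 < start:
--                 segments.append((prev_end + 1, start - 1, 'NonGait'))
--             segments.append((start, end, 'Gait'))
--             prev_end = end
--         k += 1
--     if prev_end + 1 < n:
--         segments.append((prev_end + 1, n - 1, 'NonGait'))
--     return segments
-- ===== Notes on version B (the rewrite author's own statement) =====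
-- stated objective: alternative
-- what changed: B replaces A's pipeline (compress values+indices into parallel arrays, two separate slice-comparison pattern searches each re-extending the match end with a while loop, concatenate, sort by start, then a separate gap-filling pass) by one forward two-pointer pass that builds maximal runs (value, start, end) and a single scan over the runs that recognizes both run-value patterns at once and emits Gait and NonGait segments directly in order, with no slicing, no sorting and no re-extension.
import Mathlib
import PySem

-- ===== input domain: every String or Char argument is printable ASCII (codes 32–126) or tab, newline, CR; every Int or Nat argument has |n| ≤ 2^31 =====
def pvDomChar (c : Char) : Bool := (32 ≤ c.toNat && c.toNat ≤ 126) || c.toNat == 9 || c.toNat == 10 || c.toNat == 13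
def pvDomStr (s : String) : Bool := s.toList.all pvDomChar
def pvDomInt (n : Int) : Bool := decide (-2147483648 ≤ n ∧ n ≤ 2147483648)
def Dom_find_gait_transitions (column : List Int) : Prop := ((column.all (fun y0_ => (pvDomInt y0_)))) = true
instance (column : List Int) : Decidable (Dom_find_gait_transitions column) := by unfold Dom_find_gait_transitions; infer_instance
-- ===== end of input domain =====

-- B replaces A's compress/slice-match/sort pipeline by one two-pointer pass building maximal runs
-- and a single scan over them that emits Gait and NonGait segments directly (objective: alternative).

-- ===== PORT A =====
-- helper: compress_repeats_with_index (all pyGetD indices are in range at every use)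
def compress_repeats_with_index (lst : List Int) : List Int × List Int :=
  if lst = [] then ([], [])
  else
    (PySem.List.pyRange 1 lst.length 1).foldl
      (fun st i =>
        if PySem.List.pyGetD lst i 0 ≠ PySem.List.pyGetD st.1 (-1) 0 then
          (st.1 ++ [PySem.List.pyGetD lst i 0], st.2 ++ [i])
        else st)
      ([PySem.List.pyGetD lst 0 0], [0])

-- helper: the `while j + 1 < len(column) and column[j+1] == sequence[-1]: j += 1` loop
-- (fuel only bounds the loop; column.length steps always suffice, proofs below never rely on more)
def extendMatchEnd : Nat → List Int → Int → Int → Int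
  | 0, _, _, j => j
  | Nat.succ fuel, column, last, j =>
    if j + 1 < (column.length : Int) ∧ PySem.List.pyGetD column (j + 1) 0 = last then
      extendMatchEnd fuel column last (j + 1)
    else j

def find_sequence_with_original_indices (column sequence : List Int) : List (Int × Int) :=
  let cp := compress_repeats_with_index column
  (PySem.List.pyRange 0 ((cp.1.length : Int) - (sequence.length : Int) + 1) 1).foldl
    (fun acc i =>
      if PySem.List.slice cp.1 (some i) (some (i + (sequence.length : Int))) = sequence then
        let start := PySem.List.pyGetD cp.2 i 0
        let j0 := PySem.List.pyGetD cp.2 (i + (sequence.length : Int) - 1) 0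
        let j := extendMatchEnd column.length column (PySem.List.pyGetD sequence (-1) 0) j0
        acc ++ [(start, j)]
      else acc)
    []

def find_gait_transitions (column : List Int) : List (Int × Int × String) :=
  let GC_013 := find_sequence_with_original_indices column [0, 1, 3]
  let GC_0123 := find_sequence_with_original_indices column [0, 1, 2, 3]
  let ms := PySem.List.sorted (GC_013 ++ GC_0123) (fun x => x.1) false
  let st := ms.foldl
    (fun (st : List (Int × Int × String) × Int) m =>
      let segs := if st.2 + 1 < m.1 then st.1 ++ [(st.2 + 1, m.1 - 1, "NonGait")] else st.1
      (segs ++ [(m.1, m.2, "Gait")], m.2))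
    ([], -1)
  if st.2 + 1 < (column.length : Int) then st.1 ++ [(st.2 + 1, (column.length : Int) - 1, "NonGait")]
  else st.1

-- ===== PORT B =====
-- inner while of the run builder: `while j + 1 < n and column[j+1] == column[i]: j += 1` (v = column[i];
-- fuel only bounds the loop, column.length steps always suffice)
def runEnd : Nat → List Int → Int → Int → Int
  | 0, _, _, j => j
  | Nat.succ fuel, column, v, j =>
    if j + 1 < (column.length : Int) ∧ PySem.List.pyGetD column (j + 1) 0 = v then
      runEnd fuel column v (j + 1)
    else j

-- outer `while i < n` loop building the list of maximal runs (value, start, end)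
-- (fuel bounds the loop; column.length iterations always suffice since i strictly increases)
def buildRuns : Nat → List Int → Int → List (Int × Int × Int)
  | 0, _, _ => []
  | Nat.succ fuel, column, i =>
    if i < (column.length : Int) then
      let v := PySem.List.pyGetD column i 0
      let j := runEnd column.length column v i
      (v, i, j) :: buildRuns fuel column (j + 1)
    else []

-- the `while k < m` scan over the runs (returns (segments, prev_end));
-- fuel bounds the loop, runs.length iterations suffice since k increases by one
def scanRuns : Nat → List (Int × Int × Int) → Int → List (Int × Int × String) → Int →
    List (Int × Int × String) × Int
  | 0, _, _, segments, prev_end => (segments, prev_end)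
  | Nat.succ fuel, runs, k, segments, prev_end =>
    if k < (runs.length : Int) then
    let m := (runs.length : Int)
    let d : Int × Int × Int := (0, 0, 0)
    let endO : Option Int :=
      if k + 2 < m ∧ (PySem.List.pyGetD runs k d).1 = 0 ∧ (PySem.List.pyGetD runs (k + 1) d).1 = 1 then
        if (PySem.List.pyGetD runs (k + 2) d).1 = 3 then some (PySem.List.pyGetD runs (k + 2) d).2.2
        else if (PySem.List.pyGetD runs (k + 2) d).1 = 2 ∧ k + 3 < m ∧ (PySem.List.pyGetD runs (k + 3) d).1 = 3 then
          some (PySem.List.pyGetD runs (k + 3) d).2.2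
        else none
      else none
    match endO with
    | some e =>
      let start := (PySem.List.pyGetD runs k d).2.1
      let segments := if prev_end + 1 < start then segments ++ [(prev_end + 1, start - 1, "NonGait")] else segments
      scanRuns fuel runs (k + 1) (segments ++ [(start, e, "Gait")]) e
    | none => scanRuns fuel runs (k + 1) segments prev_end
    else (segments, prev_end)

def find_gait_transitions_alt (column : List Int) : List (Int × Int × String) :=
  let n := (column.length : Int)
  let runs := buildRuns column.length column 0
  let st := scanRuns runs.length runs 0 [] (-1)
  if st.2 + 1 < n then st.1 ++ [(st.2 + 1, n - 1, "NonGait")] else st.1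

-- ===== PRECONDITION & SPEC =====
def Spec_find_gait_transitions (column : List Int) (out : List (Int × Int × String)) : Prop := out = find_gait_transitions_alt column
instance (column : List Int) (out : List (Int × Int × String)) : Decidable (Spec_find_gait_transitions column out) := by unfold Spec_find_gait_transitions; infer_instance

-- ===== CLAIM (what is proved, stated in full; the proofs are below) =====
def Claim_equal_find_gait_transitions : Prop := ∀ (column : List Int), Dom_find_gait_transitions column → Spec_find_gait_transitions column (find_gait_transitions column)

-- ===== LEMMAS AND PROOFS =====

-- ---- runEnd structure ----
theorem runEnd_ge (fuel : Nat) (column : List Int) (v : Int) :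
    ∀ j : Int, j ≤ runEnd fuel column v j := by
  induction fuel with
  | zero => intro j; exact le_refl _
  | succ m ih =>
    intro j
    rw [runEnd]
    split
    · have := ih (j + 1); omega
    · exact le_refl _

theorem runEnd_lt (fuel : Nat) (column : List Int) (v : Int) :
    ∀ j : Int, j < (column.length : Int) → runEnd fuel column v j < (column.length : Int) := by
  induction fuel with
  | zero => intro j h; exact h
  | succ m ih =>
    intro j h
    rw [runEnd]
    split
    · next hc => exact ih (j + 1) hc.1
    · exact h

theorem runEnd_vals (fuel : Nat) (column : List Int) (v : Int) :
    ∀ j t : Int, j < t → t ≤ runEnd fuel column v j → PySem.List.pyGetD column t 0 = v := by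
  induction fuel with
  | zero => intro j t h1 h2; simp only [runEnd] at h2; omega
  | succ m ih =>
    intro j t h1 h2
    rw [runEnd] at h2
    split at h2
    · next hc =>
      by_cases he : t = j + 1
      · subst he; exact hc.2
      · exact ih (j + 1) t (by omega) h2
    · omega

theorem runEnd_stop (fuel : Nat) (column : List Int) (v : Int) :
    ∀ j : Int, j < (column.length : Int) →
      ((column.length : Int) - (j + 1)).toNat ≤ fuel →
      runEnd fuel column v j + 1 = (column.length : Int) ∨
        PySem.List.pyGetD column (runEnd fuel column v j + 1) 0 ≠ v := by
  induction fuel with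
  | zero =>
    intro j h hf
    simp only [runEnd]
    left; omega
  | succ m ih =>
    intro j h hf
    rw [runEnd]
    split
    · next hc => exact ih (j + 1) hc.1 (by omega)
    · next hc =>
      by_cases hl : j + 1 < (column.length : Int)
      · right; intro hv; exact hc ⟨hl, hv⟩
      · left; omega

-- ---- buildRuns structure ----
theorem buildRuns_nil (fuel : Nat) (column : List Int) (i : Int)
    (h : (column.length : Int) ≤ i) : buildRuns fuel column i = [] := by
  cases fuel with
  | zero => rfl
  | succ m => rw [buildRuns, if_neg (by omega)]

theorem buildRuns_fuel_irrel (column : List Int) :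
    ∀ (fuel1 fuel2 : Nat) (i : Int),
      ((column.length : Int) - i).toNat ≤ fuel1 → ((column.length : Int) - i).toNat ≤ fuel2 →
      buildRuns fuel1 column i = buildRuns fuel2 column i := by
  intro fuel1
  induction fuel1 with
  | zero =>
    intro fuel2 i h1 h2
    rw [buildRuns_nil 0 column i (by omega), buildRuns_nil fuel2 column i (by omega)]
  | succ m ih =>
    intro fuel2 i h1 h2
    by_cases hi : i < (column.length : Int)
    · have hge := runEnd_ge column.length column (PySem.List.pyGetD column i 0) i
      cases fuel2 with
      | zero => omega
      | succ m2 =>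
        rw [buildRuns, buildRuns, if_pos hi, if_pos hi]
        simp only
        rw [ih m2 (runEnd column.length column (PySem.List.pyGetD column i 0) i + 1)
          (by omega) (by omega)]
    · rw [buildRuns_nil _ column i (by omega), buildRuns_nil _ column i (by omega)]

theorem buildRuns_cons (fuel : Nat) (column : List Int) (i : Int)
    (h : i < (column.length : Int)) (hf : ((column.length : Int) - i).toNat ≤ fuel) :
    buildRuns fuel column i =
      (PySem.List.pyGetD column i 0, i,
        runEnd column.length column (PySem.List.pyGetD column i 0) i) ::
      buildRuns fuel column (runEnd column.length column (PySem.List.pyGetD column i 0) i + 1) := by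
  cases fuel with
  | zero => omega
  | succ m =>
    rw [buildRuns, if_pos h]
    simp only [List.cons.injEq, true_and]
    have hge := runEnd_ge column.length column (PySem.List.pyGetD column i 0) i
    exact buildRuns_fuel_irrel column m (m + 1)
      (runEnd column.length column (PySem.List.pyGetD column i 0) i + 1) (by omega) (by omega)

theorem buildRuns_facts (column : List Int) :
    ∀ (fuel : Nat) (i : Int) (k : Nat) (hk : k < (buildRuns fuel column i).length),
      (buildRuns fuel column i)[k].1 =
        PySem.List.pyGetD column ((buildRuns fuel column i)[k].2.1) 0 ∧
      (buildRuns fuel column i)[k].2.2 =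
        runEnd column.length column ((buildRuns fuel column i)[k].1)
          ((buildRuns fuel column i)[k].2.1) ∧
      i ≤ (buildRuns fuel column i)[k].2.1 ∧
      (buildRuns fuel column i)[k].2.1 ≤ (buildRuns fuel column i)[k].2.2 ∧
      (buildRuns fuel column i)[k].2.2 < (column.length : Int) := by
  intro fuel
  induction fuel with
  | zero => intro i k hk; simp [buildRuns] at hk
  | succ m ih =>
    intro i k hk
    by_cases hi : i < (column.length : Int)
    · simp only [buildRuns, if_pos hi] at hk ⊢
      match k with
      | 0 =>
        refine ⟨rfl, rfl, le_refl _, runEnd_ge _ _ _ _, runEnd_lt _ _ _ _ hi⟩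
      | Nat.succ k' =>
        have hk' : k' < (buildRuns m column
            (runEnd column.length column (PySem.List.pyGetD column i 0) i + 1)).length := by
          simpa using hk
        have := ih (runEnd column.length column (PySem.List.pyGetD column i 0) i + 1) k' hk'
        have hge := runEnd_ge column.length column (PySem.List.pyGetD column i 0) i
        simp only [List.getElem_cons_succ]
        exact ⟨this.1, this.2.1, by omega, this.2.2.2.1, this.2.2.2.2⟩
    · rw [buildRuns_nil _ column i (by omega)] at hk
      simp at hk

theorem buildRuns_start_ge (column : List Int) :
    ∀ (fuel : Nat) (i : Int), ∀ r ∈ buildRuns fuel column i, i ≤ r.2.1 := by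
  intro fuel
  induction fuel with
  | zero => intro i r hr; simp [buildRuns] at hr
  | succ m ih =>
    intro i r hr
    by_cases hi : i < (column.length : Int)
    · rw [buildRuns, if_pos hi] at hr
      simp only at hr
      rcases List.mem_cons.mp hr with hr | hr
      · subst hr; exact le_refl _
      · have hge := runEnd_ge column.length column (PySem.List.pyGetD column i 0) i
        have := ih _ r hr
        omega
    · rw [buildRuns_nil _ column i (by omega)] at hr
      simp at hr

theorem buildRuns_pairwise (column : List Int) :
    ∀ (fuel : Nat) (i : Int),
      (buildRuns fuel column i).Pairwise (fun a b => a.2.1 < b.2.1) := by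
  intro fuel
  induction fuel with
  | zero => intro i; exact List.Pairwise.nil
  | succ m ih =>
    intro i
    by_cases hi : i < (column.length : Int)
    · rw [buildRuns, if_pos hi]
      simp only
      refine List.Pairwise.cons ?_ (ih _)
      intro b hb
      have h1 := buildRuns_start_ge column m _ b hb
      have h2 := runEnd_ge column.length column (PySem.List.pyGetD column i 0) i
      simp only
      omega
    · rw [buildRuns_nil _ column i (by omega)]
      exact List.Pairwise.nil

-- ---- compress fold = runs projections ----
def stepA (lst : List Int) (st : List Int × List Int) (i : Int) : List Int × List Int :=
  if PySem.List.pyGetD lst i 0 ≠ PySem.List.pyGetD st.1 (-1) 0 then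
    (st.1 ++ [PySem.List.pyGetD lst i 0], st.2 ++ [i])
  else st

theorem foldA_noop (column : List Int) :
    ∀ (fuel : Nat) (a b : Int), (b - a).toNat ≤ fuel →
      ∀ (C : List Int) (I : List Int) (v : Int), PySem.List.pyGetD C (-1) 0 = v →
        (∀ t, a ≤ t → t < b → PySem.List.pyGetD column t 0 = v) →
        (PySem.List.pyRange a b).foldl (stepA column) (C, I) = (C, I) := by
  intro fuel
  induction fuel with
  | zero =>
    intro a b hf C I v hC hv
    rw [PySem.List.pyRange_one_eq_nil (by omega)]
    rfl
  | succ m ih =>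
    intro a b hf C I v hC hv
    by_cases hab : b ≤ a
    · rw [PySem.List.pyRange_one_eq_nil hab]; rfl
    · rw [PySem.List.pyRange_one_cons (by omega)]
      simp only [List.foldl_cons]
      have hstep : stepA column (C, I) a = (C, I) := by
        simp only [stepA, hC, hv a (le_refl _) (by omega), ne_eq, not_true_eq_false,
          if_false]
      rw [hstep]
      exact ih (a + 1) b (by omega) C I v hC (fun t h1 h2 => hv t (by omega) h2)

theorem foldA_main (column : List Int) :
    ∀ (fuel : Nat) (i : Int), ((column.length : Int) - i).toNat ≤ fuel →
      0 ≤ i → i < (column.length : Int) →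
      ∀ (C : List Int) (I : List Int), C ≠ [] →
        PySem.List.pyGetD C (-1) 0 = PySem.List.pyGetD column i 0 →
        (PySem.List.pyRange (i + 1) column.length).foldl (stepA column) (C, I) =
          (C ++ (buildRuns column.length column (runEnd column.length column (PySem.List.pyGetD column i 0) i + 1)).map (fun r => r.1),
           I ++ (buildRuns column.length column (runEnd column.length column (PySem.List.pyGetD column i 0) i + 1)).map (fun r => r.2.1)) := by
  intro fuel
  induction fuel with
  | zero => intro i hf h0 hi; omega
  | succ m ih =>
    intro i hf h0 hi C I hCne hC
    have hie := runEnd_ge column.length column (PySem.List.pyGetD column i 0) i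
    have hen := runEnd_lt column.length column (PySem.List.pyGetD column i 0) i hi
    rw [PySem.List.pyRange_one_append (i + 1) (runEnd column.length column (PySem.List.pyGetD column i 0) i + 1)
      column.length (by omega) (by omega), List.foldl_append]
    rw [foldA_noop column ((runEnd column.length column (PySem.List.pyGetD column i 0) i + 1) - (i + 1)).toNat
      (i + 1) (runEnd column.length column (PySem.List.pyGetD column i 0) i + 1) (le_refl _) C I
      (PySem.List.pyGetD column i 0) hC
      (fun t h1 h2 => runEnd_vals column.length column (PySem.List.pyGetD column i 0) i t (by omega) (by omega))]
    by_cases he : runEnd column.length column (PySem.List.pyGetD column i 0) i + 1 < (column.length : Int)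
    · have hstop : PySem.List.pyGetD column (runEnd column.length column (PySem.List.pyGetD column i 0) i + 1) 0 ≠
          PySem.List.pyGetD column i 0 :=
        (runEnd_stop column.length column (PySem.List.pyGetD column i 0) i hi (by omega)).resolve_left (by omega)
      rw [PySem.List.pyRange_one_cons (by omega)]
      simp only [List.foldl_cons]
      have hstep : stepA column (C, I) (runEnd column.length column (PySem.List.pyGetD column i 0) i + 1) =
          (C ++ [PySem.List.pyGetD column (runEnd column.length column (PySem.List.pyGetD column i 0) i + 1) 0],
           I ++ [runEnd column.length column (PySem.List.pyGetD column i 0) i + 1]) := by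
        simp only [stepA, hC]
        rw [if_pos hstop]
      rw [hstep]
      rw [ih (runEnd column.length column (PySem.List.pyGetD column i 0) i + 1) (by omega) (by omega) he
        (C ++ [PySem.List.pyGetD column (runEnd column.length column (PySem.List.pyGetD column i 0) i + 1) 0])
        (I ++ [runEnd column.length column (PySem.List.pyGetD column i 0) i + 1]) (by simp)
        (PySem.List.pyGetD_neg_one_append_singleton C _ 0)]
      rw [buildRuns_cons column.length column (runEnd column.length column (PySem.List.pyGetD column i 0) i + 1) he (by omega)]
      simp [List.append_assoc]
    · rw [PySem.List.pyRange_one_eq_nil (by omega)]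
      rw [buildRuns_nil _ column _ (by omega)]
      simp

theorem compress_eq (column : List Int) :
    compress_repeats_with_index column =
      ((buildRuns column.length column 0).map (fun r => r.1), (buildRuns column.length column 0).map (fun r => r.2.1)) := by
  by_cases h : column = []
  · subst h
    simp [compress_repeats_with_index, buildRuns]
  · have hn : 0 < (column.length : Int) := by
      cases column with
      | nil => exact absurd rfl h
      | cons a l => simp
    unfold compress_repeats_with_index
    rw [if_neg h]
    show (PySem.List.pyRange 1 column.length).foldl (stepA column)
        ([PySem.List.pyGetD column 0 0], [0]) = _
    have hC : PySem.List.pyGetD [PySem.List.pyGetD column 0 0] (-1) 0 = PySem.List.pyGetD column 0 0 := by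
      have := PySem.List.pyGetD_neg_one_append_singleton ([] : List Int) (PySem.List.pyGetD column 0 0) 0
      simpa using this
    have := foldA_main column ((column.length : Int) - 0).toNat 0 (le_refl _) (le_refl _) hn
      [PySem.List.pyGetD column 0 0] [0] (by simp) hC
    rw [show PySem.List.pyRange 1 (column.length : Int) 1 =
        PySem.List.pyRange (0 + 1) (column.length : Int) 1 by norm_num]
    rw [this]
    rw [buildRuns_cons column.length column 0 hn (by omega)]
    simp

-- ---- B-side scan = gap-filling fold over the selected matches ----
def gSel (R : List (Int × Int × Int)) (k : Int) : Option (Int × Int) :=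
  if k + 2 < (R.length : Int) ∧ (PySem.List.pyGetD R k (0, 0, 0)).1 = 0 ∧
      (PySem.List.pyGetD R (k + 1) (0, 0, 0)).1 = 1 then
    if (PySem.List.pyGetD R (k + 2) (0, 0, 0)).1 = 3 then
      some ((PySem.List.pyGetD R k (0, 0, 0)).2.1, (PySem.List.pyGetD R (k + 2) (0, 0, 0)).2.2)
    else if (PySem.List.pyGetD R (k + 2) (0, 0, 0)).1 = 2 ∧ k + 3 < (R.length : Int) ∧
        (PySem.List.pyGetD R (k + 3) (0, 0, 0)).1 = 3 then
      some ((PySem.List.pyGetD R k (0, 0, 0)).2.1, (PySem.List.pyGetD R (k + 3) (0, 0, 0)).2.2)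
    else none
  else none

def gapStep (st : List (Int × Int × String) × Int) (x : Int × Int) :
    List (Int × Int × String) × Int :=
  ((if st.2 + 1 < x.1 then st.1 ++ [(st.2 + 1, x.1 - 1, "NonGait")] else st.1) ++
    [(x.1, x.2, "Gait")], x.2)

theorem scan_eq (R : List (Int × Int × Int)) :
    ∀ (fuel : Nat) (k : Int), ((R.length : Int) - k).toNat ≤ fuel →
      ∀ segs prev, scanRuns fuel R k segs prev =
        (List.filterMap (gSel R) (PySem.List.pyRange k R.length)).foldl gapStep (segs, prev) := by
  intro fuel
  induction fuel with
  | zero =>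
    intro k hf segs prev
    rw [scanRuns, PySem.List.pyRange_one_eq_nil (by omega)]
    rfl
  | succ m ih =>
    intro k hf segs prev
    by_cases hk : k < (R.length : Int)
    · rw [scanRuns, if_pos hk, PySem.List.pyRange_one_cons hk]
      simp only [List.filterMap_cons]
      by_cases h1 : k + 2 < (R.length : Int) ∧ (PySem.List.pyGetD R k (0, 0, 0)).1 = 0 ∧
          (PySem.List.pyGetD R (k + 1) (0, 0, 0)).1 = 1
      · by_cases h2 : (PySem.List.pyGetD R (k + 2) (0, 0, 0)).1 = 3
        · simp only [gSel, if_pos h1, if_pos h2]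
          rw [ih (k + 1) (by omega)]
          rfl
        · by_cases h3 : (PySem.List.pyGetD R (k + 2) (0, 0, 0)).1 = 2 ∧ k + 3 < (R.length : Int) ∧
              (PySem.List.pyGetD R (k + 3) (0, 0, 0)).1 = 3
          · simp only [gSel, if_pos h1, if_neg h2, if_pos h3]
            rw [ih (k + 1) (by omega)]
            rfl
          · simp only [gSel, if_pos h1, if_neg h2, if_neg h3]
            exact ih (k + 1) (by omega) segs prev
      · simp only [gSel, if_neg h1]
        exact ih (k + 1) (by omega) segs prev
    · rw [scanRuns, if_neg hk, PySem.List.pyRange_one_eq_nil (by omega)]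
      rfl

-- ---- A-side: the match-collecting fold as a filterMap ----
theorem foldl_ite_filterMap {α β : Type} (P : α → Prop) [DecidablePred P] (g : α → β)
    (l : List α) (acc : List β) :
    l.foldl (fun acc x => if P x then acc ++ [g x] else acc) acc =
      acc ++ l.filterMap (fun x => if P x then some (g x) else none) := by
  induction l generalizing acc with
  | nil => simp
  | cons a l ih =>
    by_cases h : P a
    · simp [h, ih]
    · simp [h, ih]

def fSel (column : List Int) (R : List (Int × Int × Int)) (seq : List Int) (i : Int) :
    Option (Int × Int) :=
  if PySem.List.slice (R.map (fun r => r.1)) (some i) (some (i + (seq.length : Int))) = seq then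
    some (PySem.List.pyGetD (R.map (fun r => r.2.1)) i 0,
      extendMatchEnd column.length column (PySem.List.pyGetD seq (-1) 0)
        (PySem.List.pyGetD (R.map (fun r => r.2.1)) (i + (seq.length : Int) - 1) 0))
  else none

theorem find_seq_eq (column seq : List Int) :
    find_sequence_with_original_indices column seq =
      List.filterMap (fSel column (buildRuns column.length column 0) seq)
        (PySem.List.pyRange 0 (((buildRuns column.length column 0).length : Int) - (seq.length : Int) + 1)) := by
  unfold find_sequence_with_original_indices
  rw [compress_eq]
  have h := foldl_ite_filterMap
    (fun i => PySem.List.slice ((buildRuns column.length column 0).map (fun r => r.1)) (some i)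
      (some (i + (seq.length : Int))) = seq)
    (fun i => (PySem.List.pyGetD ((buildRuns column.length column 0).map (fun r => r.2.1)) i 0,
      extendMatchEnd column.length column (PySem.List.pyGetD seq (-1) 0)
        (PySem.List.pyGetD ((buildRuns column.length column 0).map (fun r => r.2.1)) (i + (seq.length : Int) - 1) 0)))
    (PySem.List.pyRange 0 ((((buildRuns column.length column 0).map (fun r => r.1)).length : Int) - (seq.length : Int) + 1))
    []
  simp only [List.nil_append] at h
  simp only [List.length_map] at h ⊢
  exact h
-- ---- slice pattern tests as pointwise conditions ----
theorem take3_iff {α : Type} (d : List α) (x y z : α) :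
    d.take 3 = [x, y, z] ↔ (d[0]? = some x ∧ d[1]? = some y ∧ d[2]? = some z) := by
  match d with
  | [] => simp
  | [a1] => simp
  | [a1, a2] => simp
  | a1 :: a2 :: a3 :: rest => simp

theorem take4_iff {α : Type} (d : List α) (x y z w : α) :
    d.take 4 = [x, y, z, w] ↔
      (d[0]? = some x ∧ d[1]? = some y ∧ d[2]? = some z ∧ d[3]? = some w) := by
  match d with
  | [] => simp
  | [a1] => simp
  | [a1, a2] => simp
  | [a1, a2, a3] => simp
  | a1 :: a2 :: a3 :: a4 :: rest => simp

theorem slice3_iff (R : List (Int × Int × Int)) (k : Int) (hk : 0 ≤ k) (x y z : Int) :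
    PySem.List.slice (R.map (fun r => r.1)) (some k) (some (k + 3)) = [x, y, z] ↔
      (R[k.toNat]?.map (fun r => r.1) = some x ∧
       R[k.toNat + 1]?.map (fun r => r.1) = some y ∧
       R[k.toNat + 2]?.map (fun r => r.1) = some z) := by
  rw [PySem.List.slice_toNat _ hk (by omega)]
  have h3 : (k + 3).toNat - k.toNat = 3 := by omega
  rw [h3, take3_iff]
  simp [List.getElem?_drop, List.getElem?_map]

theorem slice4_iff (R : List (Int × Int × Int)) (k : Int) (hk : 0 ≤ k) (x y z w : Int) :
    PySem.List.slice (R.map (fun r => r.1)) (some k) (some (k + 4)) = [x, y, z, w] ↔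
      (R[k.toNat]?.map (fun r => r.1) = some x ∧
       R[k.toNat + 1]?.map (fun r => r.1) = some y ∧
       R[k.toNat + 2]?.map (fun r => r.1) = some z ∧
       R[k.toNat + 3]?.map (fun r => r.1) = some w) := by
  rw [PySem.List.slice_toNat _ hk (by omega)]
  have h4 : (k + 4).toNat - k.toNat = 4 := by omega
  rw [h4, take4_iff]
  simp [List.getElem?_drop, List.getElem?_map]

-- ---- bridging the A-side match data to run data ----
theorem extendMatchEnd_eq_runEnd :
    ∀ (fuel : Nat) (column : List Int) (v j : Int),
      extendMatchEnd fuel column v j = runEnd fuel column v j := by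
  intro fuel
  induction fuel with
  | zero => intro c v j; rfl
  | succ m ih =>
    intro c v j
    rw [extendMatchEnd, runEnd]
    by_cases h : j + 1 < (c.length : Int) ∧ PySem.List.pyGetD c (j + 1) 0 = v
    · rw [if_pos h, if_pos h, ih]
    · rw [if_neg h, if_neg h]

theorem pyGetD_map_start (R : List (Int × Int × Int)) (i : Int) :
    PySem.List.pyGetD (R.map (fun r => r.2.1)) i 0 = (PySem.List.pyGetD R i (0, 0, 0)).2.1 :=
  PySem.List.pyGetD_map (fun r => r.2.1) R i (0, 0, 0)

theorem valQ_some_iff (R : List (Int × Int × Int)) (q : Int) (hq : 0 ≤ q) (c : Int) :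
    R[q.toNat]?.map (fun r => r.1) = some c ↔
      (q < (R.length : Int) ∧ (PySem.List.pyGetD R q (0, 0, 0)).1 = c) := by
  constructor
  · intro h
    rcases Option.map_eq_some_iff.mp h with ⟨r, hr, hrc⟩
    rcases List.getElem?_eq_some_iff.mp hr with ⟨hlt, hel⟩
    have hb : q < (R.length : Int) := by omega
    refine ⟨hb, ?_⟩
    rw [PySem.List.pyGetD_eq_getElem R (0, 0, 0) hq hb, hel, hrc]
  · rintro ⟨hb, hc⟩
    have hlt : q.toNat < R.length := by omega
    rw [List.getElem?_eq_getElem hlt]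
    simp only [Option.map_some, Option.some.injEq]
    rw [PySem.List.pyGetD_eq_getElem R (0, 0, 0) hq hb] at hc
    exact hc

theorem slice013_iff (R : List (Int × Int × Int)) (k : Int) (hk : 0 ≤ k) :
    PySem.List.slice (R.map (fun r => r.1)) (some k) (some (k + 3)) = [0, 1, 3] ↔
      (k + 2 < (R.length : Int) ∧ (PySem.List.pyGetD R k (0, 0, 0)).1 = 0 ∧
       (PySem.List.pyGetD R (k + 1) (0, 0, 0)).1 = 1 ∧
       (PySem.List.pyGetD R (k + 2) (0, 0, 0)).1 = 3) := by
  rw [slice3_iff R k hk]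
  have e1 : k.toNat + 1 = (k + 1).toNat := by omega
  have e2 : k.toNat + 2 = (k + 2).toNat := by omega
  rw [e1, e2, valQ_some_iff R k hk, valQ_some_iff R (k + 1) (by omega),
    valQ_some_iff R (k + 2) (by omega)]
  omega

theorem slice0123_iff (R : List (Int × Int × Int)) (k : Int) (hk : 0 ≤ k) :
    PySem.List.slice (R.map (fun r => r.1)) (some k) (some (k + 4)) = [0, 1, 2, 3] ↔
      (k + 3 < (R.length : Int) ∧ (PySem.List.pyGetD R k (0, 0, 0)).1 = 0 ∧
       (PySem.List.pyGetD R (k + 1) (0, 0, 0)).1 = 1 ∧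
       (PySem.List.pyGetD R (k + 2) (0, 0, 0)).1 = 2 ∧
       (PySem.List.pyGetD R (k + 3) (0, 0, 0)).1 = 3) := by
  rw [slice4_iff R k hk]
  have e1 : k.toNat + 1 = (k + 1).toNat := by omega
  have e2 : k.toNat + 2 = (k + 2).toNat := by omega
  have e3 : k.toNat + 3 = (k + 3).toNat := by omega
  rw [e1, e2, e3, valQ_some_iff R k hk, valQ_some_iff R (k + 1) (by omega),
    valQ_some_iff R (k + 2) (by omega), valQ_some_iff R (k + 3) (by omega)]
  omega

theorem extend_to_end (column : List Int) (q : Int) (hq : 0 ≤ q)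
    (hqm : q < ((buildRuns column.length column 0).length : Int))
    (hv : (PySem.List.pyGetD (buildRuns column.length column 0) q (0, 0, 0)).1 = 3) :
    extendMatchEnd column.length column 3 (PySem.List.pyGetD ((buildRuns column.length column 0).map (fun r => r.2.1)) q 0) =
      (PySem.List.pyGetD (buildRuns column.length column 0) q (0, 0, 0)).2.2 := by
  rw [extendMatchEnd_eq_runEnd, pyGetD_map_start]
  rw [PySem.List.pyGetD_eq_getElem (buildRuns column.length column 0) (0, 0, 0) hq hqm] at hv ⊢
  have hfacts := buildRuns_facts column column.length 0 q.toNat (by omega)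
  rw [← hv]
  exact hfacts.2.1.symm

-- ---- the two pattern searches, merged in scan order ----
def orSel (column : List Int) (R : List (Int × Int × Int)) (k : Int) : Option (Int × Int) :=
  match fSel column R [0, 1, 3] k with
  | some x => some x
  | none => fSel column R [0, 1, 2, 3] k

theorem orSel_pos (column : List Int) (R : List (Int × Int × Int)) (k : Int)
    (x : Int × Int) (h : fSel column R [0, 1, 3] k = some x) :
    orSel column R k = some x := by
  unfold orSel; rw [h]

theorem orSel_neg (column : List Int) (R : List (Int × Int × Int)) (k : Int)
    (h : fSel column R [0, 1, 3] k = none) :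
    orSel column R k = fSel column R [0, 1, 2, 3] k := by
  unfold orSel; rw [h]

theorem fSel3_eq (column : List Int) (R : List (Int × Int × Int)) (k : Int) :
    fSel column R [0, 1, 3] k =
      if PySem.List.slice (R.map (fun r => r.1)) (some k) (some (k + 3)) = [0, 1, 3] then
        some (PySem.List.pyGetD (R.map (fun r => r.2.1)) k 0,
          extendMatchEnd column.length column 3 (PySem.List.pyGetD (R.map (fun r => r.2.1)) (k + 2) 0))
      else none := by
  unfold fSel
  have hlen : (([0, 1, 3] : List Int).length : Int) = 3 := by simp
  rw [hlen]
  have he : k + 3 - 1 = k + 2 := by ring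
  rw [he]
  rfl

theorem fSel4_eq (column : List Int) (R : List (Int × Int × Int)) (k : Int) :
    fSel column R [0, 1, 2, 3] k =
      if PySem.List.slice (R.map (fun r => r.1)) (some k) (some (k + 4)) = [0, 1, 2, 3] then
        some (PySem.List.pyGetD (R.map (fun r => r.2.1)) k 0,
          extendMatchEnd column.length column 3 (PySem.List.pyGetD (R.map (fun r => r.2.1)) (k + 3) 0))
      else none := by
  unfold fSel
  have hlen : (([0, 1, 2, 3] : List Int).length : Int) = 4 := by simp
  rw [hlen]
  have he : k + 4 - 1 = k + 3 := by ring
  rw [he]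
  rfl

theorem orSel_eq_gSel (column : List Int) (k : Int) (hk : 0 ≤ k) :
    orSel column (buildRuns column.length column 0) k = gSel (buildRuns column.length column 0) k := by
  by_cases hC1 : k + 2 < ((buildRuns column.length column 0).length : Int) ∧
      (PySem.List.pyGetD (buildRuns column.length column 0) k (0, 0, 0)).1 = 0 ∧
      (PySem.List.pyGetD (buildRuns column.length column 0) (k + 1) (0, 0, 0)).1 = 1
  · by_cases hC2 : (PySem.List.pyGetD (buildRuns column.length column 0) (k + 2) (0, 0, 0)).1 = 3
    · have hs3 := (slice013_iff (buildRuns column.length column 0) k hk).mpr ⟨hC1.1, hC1.2.1, hC1.2.2, hC2⟩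
      rw [orSel_pos column (buildRuns column.length column 0) k _ (by rw [fSel3_eq, if_pos hs3])]
      unfold gSel
      rw [if_pos hC1, if_pos hC2]
      rw [pyGetD_map_start, extend_to_end column (k + 2) (by omega) hC1.1 hC2]
    · by_cases hC3 : (PySem.List.pyGetD (buildRuns column.length column 0) (k + 2) (0, 0, 0)).1 = 2 ∧
          k + 3 < ((buildRuns column.length column 0).length : Int) ∧
          (PySem.List.pyGetD (buildRuns column.length column 0) (k + 3) (0, 0, 0)).1 = 3
      · have hn3 : fSel column (buildRuns column.length column 0) [0, 1, 3] k = none := by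
          rw [fSel3_eq, if_neg]
          intro hs
          exact hC2 ((slice013_iff (buildRuns column.length column 0) k hk).mp hs).2.2.2
        have hs4 := (slice0123_iff (buildRuns column.length column 0) k hk).mpr
          ⟨hC3.2.1, hC1.2.1, hC1.2.2, hC3.1, hC3.2.2⟩
        rw [orSel_neg column (buildRuns column.length column 0) k hn3, fSel4_eq, if_pos hs4]
        unfold gSel
        rw [if_pos hC1, if_neg hC2, if_pos hC3]
        rw [pyGetD_map_start, extend_to_end column (k + 3) (by omega) hC3.2.1 hC3.2.2]
      · have hn3 : fSel column (buildRuns column.length column 0) [0, 1, 3] k = none := by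
          rw [fSel3_eq, if_neg]
          intro hs
          exact hC2 ((slice013_iff (buildRuns column.length column 0) k hk).mp hs).2.2.2
        have hn4 : fSel column (buildRuns column.length column 0) [0, 1, 2, 3] k = none := by
          rw [fSel4_eq, if_neg]
          intro hs
          have h := (slice0123_iff (buildRuns column.length column 0) k hk).mp hs
          exact hC3 ⟨h.2.2.2.1, h.1, h.2.2.2.2⟩
        rw [orSel_neg column (buildRuns column.length column 0) k hn3, hn4]
        unfold gSel
        rw [if_pos hC1, if_neg hC2, if_neg hC3]
  · have hn3 : fSel column (buildRuns column.length column 0) [0, 1, 3] k = none := by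
      rw [fSel3_eq, if_neg]
      intro hs
      have h := (slice013_iff (buildRuns column.length column 0) k hk).mp hs
      exact hC1 ⟨h.1, h.2.1, h.2.2.1⟩
    have hn4 : fSel column (buildRuns column.length column 0) [0, 1, 2, 3] k = none := by
      rw [fSel4_eq, if_neg]
      intro hs
      have h := (slice0123_iff (buildRuns column.length column 0) k hk).mp hs
      exact hC1 ⟨by omega, h.2.1, h.2.2.1⟩
    rw [orSel_neg column (buildRuns column.length column 0) k hn3, hn4]
    unfold gSel
    rw [if_neg hC1]

-- ---- extending the search ranges and merging the two searches ----
theorem fSel3_none (column : List Int) (R : List (Int × Int × Int)) (k : Int)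
    (h : (R.length : Int) - 2 ≤ k) : fSel column R [0, 1, 3] k = none := by
  rw [fSel3_eq, if_neg]
  intro hs
  have hl := congrArg List.length hs
  rw [PySem.List.length_slice] at hl
  simp only [List.length_map, List.length_cons, List.length_nil] at hl
  have h1 := PySem.List.clampIdx_le R.length (k + 3)
  have h2 := PySem.List.clampIdx_le R.length k
  simp only [PySem.List.clampIdx] at hl
  split_ifs at hl <;> omega

theorem fSel4_none (column : List Int) (R : List (Int × Int × Int)) (k : Int)
    (h : (R.length : Int) - 3 ≤ k) : fSel column R [0, 1, 2, 3] k = none := by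
  rw [fSel4_eq, if_neg]
  intro hs
  have hl := congrArg List.length hs
  rw [PySem.List.length_slice] at hl
  simp only [List.length_map, List.length_cons, List.length_nil] at hl
  have h1 := PySem.List.clampIdx_le R.length (k + 4)
  have h2 := PySem.List.clampIdx_le R.length k
  simp only [PySem.List.clampIdx] at hl
  split_ifs at hl <;> omega

theorem filterMap_pyRange_ext {β : Type} (f : Int → Option β) :
    ∀ (fuel : Nat) (a b : Int), (b - a).toNat ≤ fuel → a ≤ b →
      (∀ k, a ≤ k → k < b → f k = none) →
      List.filterMap f (PySem.List.pyRange 0 b) = List.filterMap f (PySem.List.pyRange 0 a) := by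
  intro fuel
  induction fuel with
  | zero =>
    intro a b hf hab hnone
    have : a = b := by omega
    rw [this]
  | succ m ih =>
    intro a b hf hab hnone
    by_cases heq : b ≤ a
    · have : a = b := by omega
      rw [this]
    · by_cases hb0 : b ≤ 0
      · rw [PySem.List.pyRange_one_eq_nil hb0, PySem.List.pyRange_one_eq_nil (by omega)]
      · conv_lhs => rw [show b = b - 1 + 1 by ring]
        rw [PySem.List.pyRange_one_succ_right (by omega : (0 : Int) ≤ b - 1)]
        rw [List.filterMap_append]
        simp only [List.filterMap_cons, hnone (b - 1) (by omega) (by omega),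
          List.filterMap_nil, List.append_nil]
        exact ih a (b - 1) (by omega) (by omega) (fun k h1 h2 => hnone k h1 (by omega))

theorem fSel_disjoint (column : List Int) (k : Int) (hk : 0 ≤ k) :
    fSel column (buildRuns column.length column 0) [0, 1, 3] k = none ∨
      fSel column (buildRuns column.length column 0) [0, 1, 2, 3] k = none := by
  by_cases h3 : PySem.List.slice ((buildRuns column.length column 0).map (fun r => r.1)) (some k) (some (k + 3)) = [0, 1, 3]
  · right
    rw [fSel4_eq, if_neg]
    intro h4
    have a3 := ((slice013_iff (buildRuns column.length column 0) k hk).mp h3).2.2.2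
    have a4 := ((slice0123_iff (buildRuns column.length column 0) k hk).mp h4).2.2.2.1
    omega
  · left
    rw [fSel3_eq, if_neg h3]

theorem filterMap_orSel_perm (column : List Int) (R : List (Int × Int × Int)) (l : List Int)
    (hdis : ∀ k ∈ l, fSel column R [0, 1, 3] k = none ∨ fSel column R [0, 1, 2, 3] k = none) :
    (List.filterMap (orSel column R) l).Perm
      (List.filterMap (fSel column R [0, 1, 3]) l ++ List.filterMap (fSel column R [0, 1, 2, 3]) l) := by
  induction l with
  | nil => simp
  | cons a l ih =>
    have ihl := ih (fun k hk => hdis k (List.mem_cons_of_mem a hk))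
    rcases h3 : fSel column R [0, 1, 3] a with _ | x
    · rcases h4 : fSel column R [0, 1, 2, 3] a with _ | y
      · have ho : orSel column R a = none := by rw [orSel_neg column R a h3, h4]
        simp only [List.filterMap_cons, ho, h3, h4]
        exact ihl
      · have ho : orSel column R a = some y := by rw [orSel_neg column R a h3, h4]
        simp only [List.filterMap_cons, ho, h3, h4]
        exact (ihl.cons y).trans List.perm_middle.symm
    · have h4 : fSel column R [0, 1, 2, 3] a = none := by
        rcases hdis a List.mem_cons_self with h | h
        · rw [h3] at h; cases h
        · exact h
      have ho : orSel column R a = some x := orSel_pos column R a x h3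
      simp only [List.filterMap_cons, ho, h3, h4]
      exact ihl.cons x

theorem gSel_some_start (R : List (Int × Int × Int)) (a : Int) (x : Int × Int)
    (h : gSel R a = some x) :
    a + 2 < (R.length : Int) ∧ x.1 = (PySem.List.pyGetD R a (0, 0, 0)).2.1 := by
  unfold gSel at h
  split_ifs at h with h1 h2 h3 <;> cases h <;> exact ⟨h1.1, rfl⟩

theorem gSel_pairwise (column : List Int) :
    (List.filterMap (gSel (buildRuns column.length column 0)) (PySem.List.pyRange 0 (buildRuns column.length column 0).length)).Pairwise
      (fun a b => a.1 < b.1) := by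
  rw [List.pairwise_filterMap]
  refine List.Pairwise.imp_of_mem ?_ (PySem.List.pairwise_lt_pyRange_one 0 (buildRuns column.length column 0).length)
  intro a b ha hb hab x hx y hy
  have hax := gSel_some_start (buildRuns column.length column 0) a x hx
  have hbx := gSel_some_start (buildRuns column.length column 0) b y hy
  have ha0 : 0 ≤ a := (PySem.List.mem_pyRange_one.mp ha).1
  have hb0 : 0 ≤ b := (PySem.List.mem_pyRange_one.mp hb).1
  have ham : a < ((buildRuns column.length column 0).length : Int) := by omega
  have hbm : b < ((buildRuns column.length column 0).length : Int) := by omega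
  rw [hax.2, hbx.2, PySem.List.pyGetD_eq_getElem _ _ ha0 ham,
    PySem.List.pyGetD_eq_getElem _ _ hb0 hbm]
  exact (List.pairwise_iff_getElem.mp (buildRuns_pairwise column column.length 0)) a.toNat b.toNat
    (by omega) (by omega) (by omega)

theorem matches_eq (column : List Int) :
    PySem.List.sorted
      (find_sequence_with_original_indices column [0, 1, 3] ++
        find_sequence_with_original_indices column [0, 1, 2, 3]) (fun x => x.1) =
      List.filterMap (gSel (buildRuns column.length column 0)) (PySem.List.pyRange 0 (buildRuns column.length column 0).length) := by
  apply PySem.List.sorted_eq_of_perm_of_pairwise_lt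
  · have h3 : find_sequence_with_original_indices column [0, 1, 3] =
        List.filterMap (fSel column (buildRuns column.length column 0) [0, 1, 3])
          (PySem.List.pyRange 0 (buildRuns column.length column 0).length) := by
      rw [find_seq_eq]
      have hlen : (([0, 1, 3] : List Int).length : Int) = 3 := by simp
      rw [hlen]
      exact (filterMap_pyRange_ext _ 3 (((buildRuns column.length column 0).length : Int) - 3 + 1)
        ((buildRuns column.length column 0).length : Int) (by omega) (by omega)
        (fun k h1 h2 => fSel3_none column (buildRuns column.length column 0) k (by omega))).symm
    have h4 : find_sequence_with_original_indices column [0, 1, 2, 3] =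
        List.filterMap (fSel column (buildRuns column.length column 0) [0, 1, 2, 3])
          (PySem.List.pyRange 0 (buildRuns column.length column 0).length) := by
      rw [find_seq_eq]
      have hlen : (([0, 1, 2, 3] : List Int).length : Int) = 4 := by simp
      rw [hlen]
      exact (filterMap_pyRange_ext _ 4 (((buildRuns column.length column 0).length : Int) - 4 + 1)
        ((buildRuns column.length column 0).length : Int) (by omega) (by omega)
        (fun k h1 h2 => fSel4_none column (buildRuns column.length column 0) k (by omega))).symm
    rw [h3, h4]
    have hco : List.filterMap (gSel (buildRuns column.length column 0))
          (PySem.List.pyRange 0 (buildRuns column.length column 0).length) =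
        List.filterMap (orSel column (buildRuns column.length column 0))
          (PySem.List.pyRange 0 (buildRuns column.length column 0).length) :=
      (List.filterMap_congr (fun k hk =>
        orSel_eq_gSel column k (PySem.List.mem_pyRange_one.mp hk).1)).symm
    rw [hco]
    exact filterMap_orSel_perm column (buildRuns column.length column 0) _
      (fun k hk => fSel_disjoint column k (PySem.List.mem_pyRange_one.mp hk).1)
  · exact gSel_pairwise column

-- ---- final assembly ----
def finishSeg (column : List Int) (st : List (Int × Int × String) × Int) :
    List (Int × Int × String) :=
  if st.2 + 1 < (column.length : Int) then
    st.1 ++ [(st.2 + 1, (column.length : Int) - 1, "NonGait")]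
  else st.1

-- ===== VERDICT (by name: the statement is the Claim_ definition above) =====
theorem find_gait_transitions_spec : Claim_equal_find_gait_transitions := by
  intro column _
  unfold Spec_find_gait_transitions
  have hA : find_gait_transitions column =
      finishSeg column ((PySem.List.sorted
        (find_sequence_with_original_indices column [0, 1, 3] ++
          find_sequence_with_original_indices column [0, 1, 2, 3]) (fun x => x.1)).foldl
        gapStep ([], -1)) := rfl
  have hB : find_gait_transitions_alt column =
      finishSeg column (scanRuns (buildRuns column.length column 0).length (buildRuns column.length column 0) 0 [] (-1)) := rfl
  rw [hA, hB, matches_eq column,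
    scan_eq (buildRuns column.length column 0) ((buildRuns column.length column 0).length) 0 (by omega) [] (-1)]
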